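-- pv_equiv track=rewrite | github.com/astronomer/astronomer-cosmos | cosmos/operators/_watcher/base.py | _filter_flags
-- ===== SOURCE A (Python) =====
-- def _filter_flags(flags: list[str]) -> list[str]:
--     """Filters out dbt flags that are incompatible with retry (e.g., --select, --exclude)."""
--     filtered = []
--     skip_next = False
--     for token in flags:
--         if skip_next:
--             if token.startswith("--"):
--                 skip_next = False
--             else:
--                 continue  # skip value of previous flag
--         if token in ("--select", "--exclude"):
--             skip_next = True
--             continue
--         filtered.append(token)
--     return filtered
-- ===== SOURCE B (Python) =====
-- def _filter_flags(flags: list[str]) -> list[str]: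
--     """Filters out dbt flags that are incompatible with retry (e.g., --select, --exclude)."""
--     filtered = []
--     i = 0
--     n = len(flags)
--     while i < n:
--         tok = flags[i]
--         if tok in ("--select", "--exclude"):
--             i += 1
--             while i < n and not flags[i].startswith("--"):
--                 i += 1  # swallow the flag's value token(s)
--         else:
--             filtered.append(tok)
--             i += 1
--     return filtered
-- ===== Notes on version B (the rewrite author's own statement) =====
-- stated objective: alternative
-- what changed: Replaces the boolean skip_next state machine over tokens with an index-based outer while loop that, on --select/--exclude, runs a nested inner while loop swallowing the value tokens until the next '--' token, which the outer loop re-examines.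
import Mathlib
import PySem

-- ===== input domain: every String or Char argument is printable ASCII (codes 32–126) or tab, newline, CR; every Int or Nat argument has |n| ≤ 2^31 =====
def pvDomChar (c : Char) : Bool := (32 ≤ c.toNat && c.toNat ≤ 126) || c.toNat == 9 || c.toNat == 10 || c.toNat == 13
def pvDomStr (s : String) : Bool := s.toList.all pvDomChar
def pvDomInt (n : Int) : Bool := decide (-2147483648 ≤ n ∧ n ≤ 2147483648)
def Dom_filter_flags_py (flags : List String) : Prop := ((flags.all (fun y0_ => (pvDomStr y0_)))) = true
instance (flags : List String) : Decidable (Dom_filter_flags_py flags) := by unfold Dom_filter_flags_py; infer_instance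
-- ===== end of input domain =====

-- B replaces A's boolean skip_next state machine by an index-based outer loop with a
-- nested inner loop that swallows a filtered flag's value tokens (objective: alternative).

-- ===== PORT A =====
-- A: single for-loop over tokens carrying the state (filtered, skip_next); the 'continue'
-- after resetting skip_next falls through to the --select/--exclude test, transcribed by
-- repeating that test in the startswith branch.  st.1 = filtered, st.2 = skip_next.
def filter_flags_py (flags : List String) : List String :=
  (flags.foldl (fun (st : List String × Bool) token =>
      if st.2 then
        if PySem.Str.startswith token "--" then
          -- skip_next := False, fall through
          if token = "--select" ∨ token = "--exclude" then (st.1, true)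
          else (st.1 ++ [token], false)
        else (st.1, true)  -- continue: skip value of previous flag
      else
        if token = "--select" ∨ token = "--exclude" then (st.1, true)
        else (st.1 ++ [token], false))
    ([], false)).1

-- ===== PORT B =====
-- inner while loop: advances i past value tokens (those not starting with "--")
def pvAltInner (flags : List String) (i : Nat) : Nat :=
  if h : i < flags.length ∧ ¬ PySem.Str.startswith flags[i]! "--" then
    pvAltInner flags (i + 1)
  else i
termination_by flags.length - i
decreasing_by omega

theorem pvAltInner_ge (flags : List String) (i : Nat) : i ≤ pvAltInner flags i := by
  fun_induction pvAltInner flags i with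
  | case1 i h ih => omega
  | case2 i h => omega

-- outer while loop over index i, building 'filtered' front-to-back
def pvAltOuter (flags : List String) (i : Nat) : List String :=
  if h : i < flags.length then
    let tok := flags[i]!
    if tok = "--select" ∨ tok = "--exclude" then
      pvAltOuter flags (pvAltInner flags (i + 1))
    else tok :: pvAltOuter flags (i + 1)
  else []
termination_by flags.length - i
decreasing_by
  · have := pvAltInner_ge flags (i + 1); omega
  · omega

def filter_flags_py_alt (flags : List String) : List String :=
  pvAltOuter flags 0

-- ===== PRECONDITION & SPEC =====
def Spec_filter_flags_py (flags : List String) (out : List String) : Prop := out = filter_flags_py_alt flags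
instance (flags : List String) (out : List String) : Decidable (Spec_filter_flags_py flags out) := by unfold Spec_filter_flags_py; infer_instance

-- ===== CLAIM (what is proved, stated in full; the proofs are below) =====
def Claim_equal_filter_flags_py : Prop := ∀ (flags : List String), Dom_filter_flags_py flags → Spec_filter_flags_py flags (filter_flags_py flags)

-- ===== LEMMAS AND PROOFS =====

-- list-level model of B's inner loop
def pvInnerL : List String → List String
  | [] => []
  | t :: rest => if PySem.Str.startswith t "--" then t :: rest else pvInnerL rest

theorem pvInnerL_len : ∀ l : List String, (pvInnerL l).length ≤ l.length := by
  intro l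
  induction l with
  | nil => simp [pvInnerL]
  | cons t rest ih =>
    rw [pvInnerL]
    split
    · exact le_rfl
    · simp only [List.length_cons]; omega

-- list-level model of B's outer loop
def pvOuterL : List String → List String
  | [] => []
  | t :: rest =>
    if t = "--select" ∨ t = "--exclude" then pvOuterL (pvInnerL rest)
    else t :: pvOuterL rest
termination_by l => l.length
decreasing_by
  · have := pvInnerL_len rest; simp; omega
  · simp

-- A's loop body, recursion form (skip state explicit)
def pvGoA : List String → Bool → List String
  | [], _ => []
  | t :: rest, skip =>
    if skip then
      if PySem.Str.startswith t "--" then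
        if t = "--select" ∨ t = "--exclude" then pvGoA rest true
        else t :: pvGoA rest false
      else pvGoA rest true
    else
      if t = "--select" ∨ t = "--exclude" then pvGoA rest true
      else t :: pvGoA rest false

-- fold with accumulator = acc ++ recursion form
theorem pvFoldA_eq (l : List String) : ∀ (acc : List String) (skip : Bool),
    (l.foldl (fun (st : List String × Bool) token =>
      if st.2 then
        if PySem.Str.startswith token "--" then
          if token = "--select" ∨ token = "--exclude" then (st.1, true)
          else (st.1 ++ [token], false)
        else (st.1, true)
      else
        if token = "--select" ∨ token = "--exclude" then (st.1, true)
        else (st.1 ++ [token], false)) (acc, skip)).1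
    = acc ++ pvGoA l skip := by
  induction l with
  | nil => intro acc skip; simp [pvGoA]
  | cons t rest ih =>
    intro acc skip
    rw [List.foldl_cons, pvGoA]
    cases skip with
    | true =>
      by_cases hsw : PySem.Str.startswith t "--"
      · by_cases hsel : t = "--select" ∨ t = "--exclude"
        · simp only [if_pos hsw, if_pos hsel]
          simpa using ih acc true
        · simp only [if_pos hsw, if_neg hsel]
          simpa using ih (acc ++ [t]) false
      · simp only [if_neg hsw]
        simpa using ih acc true
    | false =>
      by_cases hsel : t = "--select" ∨ t = "--exclude"
      · simp only [if_pos hsel]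
        simpa using ih acc true
      · simp only [if_neg hsel]
        simpa using ih (acc ++ [t]) false

-- A's recursion form equals B's list-level loops (mutual statement on the skip state)
theorem pvGoA_eq_outer (l : List String) :
    pvGoA l false = pvOuterL l ∧ pvGoA l true = pvOuterL (pvInnerL l) := by
  induction l with
  | nil => simp [pvGoA, pvOuterL, pvInnerL]
  | cons t rest ih =>
    refine ⟨?_, ?_⟩
    · rw [pvGoA, pvOuterL, if_neg (by simp : ¬ (false = true))]
      by_cases hsel : t = "--select" ∨ t = "--exclude"
      · rw [if_pos hsel, if_pos hsel, ih.2]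
      · rw [if_neg hsel, if_neg hsel, ih.1]
    · rw [pvGoA, if_pos rfl, pvInnerL]
      by_cases hsw : PySem.Str.startswith t "--"
      · rw [if_pos hsw, if_pos hsw, pvOuterL]
        by_cases hsel : t = "--select" ∨ t = "--exclude"
        · rw [if_pos hsel, if_pos hsel, ih.2]
        · rw [if_neg hsel, if_neg hsel, ih.1]
      · rw [if_neg hsw, if_neg hsw, ih.2]

-- B's index loops compute the list-level loops on the dropped suffix
theorem pvAltInner_drop (flags : List String) (i : Nat) :
    flags.drop (pvAltInner flags i) = pvInnerL (flags.drop i) := by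
  fun_induction pvAltInner flags i with
  | case1 i h ih =>
    obtain ⟨hlt, hsw⟩ := h
    rw [ih, List.drop_eq_getElem_cons hlt, pvInnerL, if_neg]
    simpa [List.getElem!_eq_getElem?_getD, List.getElem?_eq_getElem hlt] using hsw
  | case2 i h =>
    by_cases hlt : i < flags.length
    · have hsw : PySem.Str.startswith flags[i]! "--" = true := by
        by_contra hc; exact h ⟨hlt, by simpa using hc⟩
      have : pvInnerL (flags.drop i) = flags.drop i := by
        rw [List.drop_eq_getElem_cons hlt, pvInnerL, if_pos]
        simpa [List.getElem!_eq_getElem?_getD, List.getElem?_eq_getElem hlt] using hsw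
      rw [this]
    · rw [List.drop_eq_nil_of_le (by omega : flags.length ≤ i)]
      simp [pvInnerL]

theorem pvAltOuter_drop (flags : List String) (i : Nat) :
    pvAltOuter flags i = pvOuterL (flags.drop i) := by
  fun_induction pvAltOuter flags i with
  | case1 i hlt tok h ih =>
    have htok : flags[i] = tok := by
      simp [tok, List.getElem!_eq_getElem?_getD, List.getElem?_eq_getElem hlt]
    rw [ih, List.drop_eq_getElem_cons hlt, pvOuterL, htok, if_pos h, pvAltInner_drop]
  | case2 i hlt tok h ih =>
    have htok : flags[i] = tok := by
      simp [tok, List.getElem!_eq_getElem?_getD, List.getElem?_eq_getElem hlt]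
    rw [List.drop_eq_getElem_cons hlt, pvOuterL, htok, if_neg h, ih]
  | case3 i h =>
    rw [List.drop_eq_nil_of_le (by omega : flags.length ≤ i)]
    simp [pvOuterL]

-- ===== VERDICT (by name: the statement is the Claim_ definition above) =====
theorem filter_flags_py_spec : Claim_equal_filter_flags_py := by
  intro flags _
  unfold Spec_filter_flags_py filter_flags_py filter_flags_py_alt
  rw [pvFoldA_eq, pvAltOuter_drop, List.drop_zero, List.nil_append, (pvGoA_eq_outer flags).1]
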